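-- pv_equiv track=rewrite | github.com/H7M3Y/pitchor | pitchor.py | show
-- ===== SOURCE A (Python) =====
-- def show(d):
--     res = ''; prev = ''
--     for i in d:
--         if i == 'Rest':
--             res += 'x '
--         elif i == prev:
--             res += '- '
--         else:
--             res += i + ' '
--         prev = i
--     return res
-- ===== SOURCE B (Python) =====
-- def show(d):
--     parts = []
--     i = 0
--     n = len(d)
--     while i < n:
--         k = d[i]
--         j = i
--         while j < n and d[j] == k:
--             j += 1
--         c = j - i
--         if k == 'Rest':
--             parts.append('x ' * c)
--         else:
--             parts.append(k + ' ' + '- ' * (c - 1))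
--         i = j
--     return ''.join(parts)
-- ===== Notes on version B (the rewrite author's own statement) =====
-- stated objective: alternative
-- what changed: Replaces the per-element prev-sentinel loop with a run-length pass: the list is split into maximal runs of equal elements and each run is emitted at once ('x '*count for Rest, key+' '+'- '*(count-1) otherwise), joined at the end.
-- intended difference: On inputs whose first element is the empty string A prints '- ' for it (the empty string collides with A's prev='' sentinel, as if it repeated a previous note), while B prints ' ' (the note itself plus separator), which is the intended per-note formatting. — e.g. on show([""]): A returns "- ", B returns " "
import Mathlib
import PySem

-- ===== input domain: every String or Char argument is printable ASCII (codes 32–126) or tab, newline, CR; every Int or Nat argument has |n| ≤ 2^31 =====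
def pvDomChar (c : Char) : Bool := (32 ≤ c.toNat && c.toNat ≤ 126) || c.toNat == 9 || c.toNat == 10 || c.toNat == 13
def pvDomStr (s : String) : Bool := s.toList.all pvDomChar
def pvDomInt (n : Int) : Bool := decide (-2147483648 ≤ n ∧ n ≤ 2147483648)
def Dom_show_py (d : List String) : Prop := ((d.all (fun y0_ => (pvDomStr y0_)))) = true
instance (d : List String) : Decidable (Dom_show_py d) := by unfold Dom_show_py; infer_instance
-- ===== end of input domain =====

-- B is a run-length-grouping re-implementation; same output except when the input's
-- first element is the empty string (A's prev='' sentinel collision, see D_ below).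

-- ===== PORT A =====
-- A: single loop accumulating (res, prev); prev starts as ''.
def show_py (d : List String) : String :=
  (d.foldl
    (fun (s : String × String) i =>
      (s.1 ++ (if i = "Rest" then "x " else if i = s.2 then "- " else i ++ " "), i))
    ("", "")).1

-- ===== PORT B =====
-- repetition of a string, as Python's 's * c'
def strRep (s : String) : Nat → String
  | 0 => ""
  | n + 1 => s ++ strRep s n

-- inner while loop of B: count the leading elements equal to k, return (count, rest)
def takeRun (k : String) : List String → Nat × List String
  | [] => (0, [])
  | y :: t => if y = k then ((takeRun k t).1 + 1, (takeRun k t).2) else (0, y :: t)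

theorem takeRun_len (k : String) (xs : List String) : (takeRun k xs).2.length ≤ xs.length := by
  induction xs with
  | nil => simp [takeRun]
  | cons y t ih =>
    simp only [takeRun]
    split
    · exact Nat.le_trans ih (Nat.le_succ _)
    · simp

-- outer while loop of B: emit one maximal run at a time
def show_py_alt (d : List String) : String :=
  match d with
  | [] => ""
  | x :: xs =>
    (if x = "Rest" then strRep "x " ((takeRun x xs).1 + 1)
     else x ++ " " ++ strRep "- " (takeRun x xs).1) ++ show_py_alt (takeRun x xs).2
termination_by d.length
decreasing_by
  exact Nat.lt_succ_of_le (takeRun_len x xs)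

-- ===== PRECONDITION & SPEC =====
-- On inputs whose first element is the empty string, A prints '- ' for it (the empty
-- string collides with A's prev='' sentinel, as if it repeated a previous note), while
-- B prints ' ' (the note plus separator), which is the intended per-note formatting.
def D_show_py (d : List String) : Prop := d.head? = some ""
instance (d : List String) : Decidable (D_show_py d) := by unfold D_show_py; infer_instance

def Spec_show_py (d : List String) (out : String) : Prop := ¬ D_show_py d → out = show_py_alt d
instance (d : List String) (out : String) : Decidable (Spec_show_py d out) := by unfold Spec_show_py; infer_instance

def pvDiffWitness_show_py : List String := [""]
def pvDiffWitnessOut_show_py : String × String := ("- ", " ")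

-- ===== CLAIM (what is proved, stated in full; the proofs are below) =====
def Claim_unchanged_show_py : Prop := ∀ (d : List String), Dom_show_py d → Spec_show_py d (show_py d)
def Claim_changed_show_py : Prop := Dom_show_py (pvDiffWitness_show_py) ∧ D_show_py (pvDiffWitness_show_py) ∧ show_py (pvDiffWitness_show_py) = pvDiffWitnessOut_show_py.1 ∧ show_py_alt (pvDiffWitness_show_py) = pvDiffWitnessOut_show_py.2 ∧ pvDiffWitnessOut_show_py.1 ≠ pvDiffWitnessOut_show_py.2
def Claim_exact_show_py : Prop := ∀ (d : List String), Dom_show_py d → D_show_py d → show_py d ≠ show_py_alt d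

-- ===== LEMMAS AND PROOFS =====

-- tail-form rendering of A's loop: the suffix A appends when the current prev is `prev`
def showA (prev : String) : List String → String
  | [] => ""
  | i :: t => (if i = "Rest" then "x " else if i = prev then "- " else i ++ " ") ++ showA i t

theorem foldl_showA (d : List String) (res prev : String) :
    (d.foldl
      (fun (s : String × String) i =>
        (s.1 ++ (if i = "Rest" then "x " else if i = s.2 then "- " else i ++ " "), i))
      (res, prev)).1 = res ++ showA prev d := by
  induction d generalizing res prev with
  | nil => simp [showA]
  | cons i t ih => simp [showA, ih, String.append_assoc]

theorem show_py_eq_showA (d : List String) : show_py d = showA "" d := by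
  simp [show_py, foldl_showA]

-- consuming one run: with prev = x, A emits one token per element of the run
theorem showA_run (x : String) (xs : List String) :
    showA x xs = strRep (if x = "Rest" then "x " else "- ") (takeRun x xs).1
      ++ showA x (takeRun x xs).2 := by
  induction xs with
  | nil => simp [takeRun, strRep, showA]
  | cons y t ih =>
    by_cases h : y = x
    · subst h
      by_cases hr : y = "Rest"
      · subst hr
        simp [takeRun, showA, strRep, String.append_assoc, ih]
      · simp [takeRun, showA, strRep, String.append_assoc, ih, hr]
    · simp [takeRun, h, strRep]

theorem takeRun_head_ne (k : String) (xs : List String) :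
    ∀ y t, (takeRun k xs).2 = y :: t → y ≠ k := by
  induction xs with
  | nil => simp [takeRun]
  | cons z t ih =>
    intro y u h
    by_cases hz : z = k
    · simp [takeRun, hz] at h
      exact ih y u h
    · simp [takeRun, hz] at h
      rw [← h.1]; exact hz

theorem showA_eq_alt (n : Nat) : ∀ (d : List String), d.length ≤ n →
    ∀ prev, (∀ y t, d = y :: t → y ≠ prev) → showA prev d = show_py_alt d := by
  induction n with
  | zero =>
    intro d hd prev _
    interval_cases h : d.length
    · rw [List.length_eq_zero_iff] at h; subst h; simp [showA, show_py_alt]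
  | succ n ih =>
    intro d hd prev hne
    match d with
    | [] => simp [showA, show_py_alt]
    | x :: xs =>
      have hx : x ≠ prev := hne x xs rfl
      rw [show_py_alt]
      rw [showA]
      rw [showA_run x xs]
      have hrest : showA x (takeRun x xs).2 = show_py_alt (takeRun x xs).2 := by
        apply ih
        · exact Nat.le_trans (takeRun_len x xs) (Nat.succ_le_succ_iff.mp hd)
        · intro y t hyt; exact takeRun_head_ne x xs y t hyt
      rw [hrest]
      by_cases hr : x = "Rest"
      · simp [hr, strRep, String.append_assoc]
      · simp [hr, hx, String.append_assoc]

-- ===== VERDICT (by name: the statement is the Claim_ definition above) =====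
theorem show_py_spec : Claim_unchanged_show_py := by
  intro d _ hD
  rw [show_py_eq_showA]
  apply showA_eq_alt d.length d (le_refl _)
  intro y t hyt hy
  apply hD
  rw [hyt, hy]
  rfl

theorem show_py_changed : Claim_changed_show_py := by
  unfold Claim_changed_show_py
  refine ⟨by decide, by decide, rfl, ?_, by decide⟩
  show show_py_alt [""] = " "
  have hnil : show_py_alt [] = "" := by rw [show_py_alt]
  rw [show_py_alt]
  simp only [takeRun, hnil]
  decide

theorem show_py_tight : Claim_exact_show_py := by
  intro d _ hD
  cases d with
  | nil => simp [D_show_py] at hD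
  | cons x xs =>
    have hx : x = "" := by simpa [D_show_py] using hD
    subst hx
    rw [show_py_eq_showA, showA, show_py_alt]
    have h1 : (if ("" : String) = "Rest" then ("x " : String) else if ("" : String) = "" then "- " else "" ++ " ") = "- " := by decide
    rw [h1]
    have h2 : ¬ ("" : String) = "Rest" := by decide
    simp only [h2, if_false]
    intro he
    have := congrArg String.toList he
    simp [String.toList_append] at this
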